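-- pv_equiv track=rewrite | github.com/shawtypimp/essentials | hw python/hw9 zaborchik.py | zaborchik
-- ===== SOURCE A (Python) =====
-- def zaborchik(line) :
--     tmp = ''
--     i = 0
--     for w in line.lower() :
--         if w.isalpha() :
--             if i % 2:
--                 w = w.upper()
--             i += 1
--         elif w == ' ':
--             i = 0
--         tmp += w
--     return tmp
-- ===== SOURCE B (Python) =====
-- def zaborchik(line):
--     words = []
--     for word in line.lower().split(' '):
--         i = 0
--         buf = ''
--         for ch in word:
--             if ch.isalpha():
--                 if i % 2:
--                     ch = ch.upper()
--                 i += 1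
--             buf += ch
--         words.append(buf)
--     return ' '.join(words)
-- ===== Notes on version B (the rewrite author's own statement) =====
-- stated objective: alternative
-- what changed: Replaces A's flat single pass (letter counter reset at each space) by splitting the lowered line into space-separated words, transforming each word with its own letter counter, and rejoining the words.
import Mathlib
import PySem

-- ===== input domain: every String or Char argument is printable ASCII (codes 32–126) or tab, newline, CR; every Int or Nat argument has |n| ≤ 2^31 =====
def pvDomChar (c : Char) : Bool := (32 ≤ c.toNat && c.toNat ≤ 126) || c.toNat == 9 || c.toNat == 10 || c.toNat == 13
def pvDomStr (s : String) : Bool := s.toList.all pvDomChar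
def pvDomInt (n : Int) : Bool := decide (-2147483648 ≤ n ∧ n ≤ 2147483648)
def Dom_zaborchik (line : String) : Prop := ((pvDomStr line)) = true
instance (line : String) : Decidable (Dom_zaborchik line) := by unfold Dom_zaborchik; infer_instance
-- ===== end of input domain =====

-- B replaces A's flat pass (counter reset at each space) by a split / per-word transform / join decomposition: an alternative of the same cost.

-- ===== PORT A =====
-- one loop iteration of A: state (tmp, i)
def zabStepA (st : List Char × Nat) (w : Char) : List Char × Nat :=
  if PySem.Chars.isalpha w then
    (st.1 ++ [if st.2 % 2 = 1 then PySem.Chars.upperChar w else w], st.2 + 1)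
  else if w = ' ' then (st.1 ++ [w], 0)
  else (st.1 ++ [w], st.2)

def zaborchik (line : String) : String :=
  String.ofList (((PySem.Str.lower line).toList.foldl zabStepA ([], 0)).1)

-- ===== PORT B =====
-- inner loop of B over one word: state (buf, i)
def zabStepB (st : List Char × Nat) (ch : Char) : List Char × Nat :=
  if PySem.Chars.isalpha ch then
    (st.1 ++ [if st.2 % 2 = 1 then PySem.Chars.upperChar ch else ch], st.2 + 1)
  else (st.1 ++ [ch], st.2)

def zabWord (word : List Char) : List Char :=
  (word.foldl zabStepB ([], 0)).1

def zaborchik_alt (line : String) : String :=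
  String.ofList
    (PySem.Chars.join [' ']
      ((PySem.Chars.splitOn (PySem.Str.lower line).toList [' ']).map zabWord))

-- ===== PRECONDITION & SPEC =====
def Spec_zaborchik (line : String) (out : String) : Prop := out = zaborchik_alt line
instance (line : String) (out : String) : Decidable (Spec_zaborchik line out) := by unfold Spec_zaborchik; infer_instance

-- ===== CLAIM (what is proved, stated in full; the proofs are below) =====
def Claim_equal_zaborchik : Prop := ∀ (line : String), Dom_zaborchik line → Spec_zaborchik line (zaborchik line)

-- ===== LEMMAS AND PROOFS =====

-- proof-side recursive form of B's per-word transform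
def zabXf : List Char → Nat → List Char
  | [], _ => []
  | c :: rest, i =>
    if PySem.Chars.isalpha c then
      (if i % 2 = 1 then PySem.Chars.upperChar c else c) :: zabXf rest (i + 1)
    else c :: zabXf rest i

-- proof-side recursive form of A's flat pass
def zabG : List Char → Nat → List Char
  | [], _ => []
  | c :: rest, i =>
    if PySem.Chars.isalpha c then
      (if i % 2 = 1 then PySem.Chars.upperChar c else c) :: zabG rest (i + 1)
    else if c = ' ' then ' ' :: zabG rest 0
    else c :: zabG rest i

-- proof-side structural split on ' '
def zabSp : List Char → List (List Char)
  | [] => [[]]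
  | c :: rest =>
    if c = ' ' then [] :: zabSp rest
    else
      match zabSp rest with
      | [] => [[c]]
      | w :: ws => (c :: w) :: ws

-- prepend to the first piece (empty piece list = one piece)
def zabCH (x : List Char) : List (List Char) → List (List Char)
  | [] => [x]
  | w :: ws => (x ++ w) :: ws

-- glue transformed words with ' ', the first word transformed with counter i
def zabGlue : List (List Char) → Nat → List Char
  | [], _ => []
  | [w], i => zabXf w i
  | w :: ws, i => zabXf w i ++ ' ' :: zabGlue ws 0

lemma zabSp_ne_nil (cs : List Char) : zabSp cs ≠ [] := by
  cases cs with
  | nil => simp [zabSp]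
  | cons c rest =>
    simp only [zabSp]
    split
    · simp
    · split <;> simp

lemma zabCH_nil_of_ne (ws : List (List Char)) (h : ws ≠ []) : zabCH [] ws = ws := by
  cases ws with
  | nil => exact absurd rfl h
  | cons w t => simp [zabCH]

lemma zabFoldA (cs : List Char) : ∀ (tmp : List Char) (i : Nat),
    (cs.foldl zabStepA (tmp, i)).1 = tmp ++ zabG cs i := by
  induction cs with
  | nil => intro tmp i; simp [zabG]
  | cons c rest ih =>
    intro tmp i
    simp only [List.foldl_cons, zabStepA, zabG]
    by_cases ha : PySem.Chars.isalpha c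
    · simp [ha, ih]
    · by_cases hsp : c = ' '
      · subst hsp
        simp [show PySem.Chars.isalpha ' ' = false from by decide, ih]
      · simp [ha, hsp, ih]

lemma zabFoldB (w : List Char) : ∀ (buf : List Char) (i : Nat),
    (w.foldl zabStepB (buf, i)).1 = buf ++ zabXf w i := by
  induction w with
  | nil => intro buf i; simp [zabXf]
  | cons c rest ih =>
    intro buf i
    simp only [List.foldl_cons, zabStepB, zabXf]
    by_cases ha : PySem.Chars.isalpha c
    · simp [ha, ih]
    · simp [ha, ih]

lemma zabWord_eq (w : List Char) : zabWord w = zabXf w 0 := by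
  simpa using zabFoldB w [] 0

lemma zabGlue_ch_cons (c : Char) (w : List Char) (ws : List (List Char)) (i : Nat)
    (ha : PySem.Chars.isalpha c = true) :
    zabGlue ((c :: w) :: ws) i =
      (if i % 2 = 1 then PySem.Chars.upperChar c else c) :: zabGlue (w :: ws) (i + 1) := by
  cases ws <;> simp [zabGlue, zabXf, ha]

lemma zabGlue_ch_cons' (c : Char) (w : List Char) (ws : List (List Char)) (i : Nat)
    (ha : ¬ PySem.Chars.isalpha c = true) :
    zabGlue ((c :: w) :: ws) i = c :: zabGlue (w :: ws) i := by
  cases ws <;> simp [zabGlue, zabXf, ha]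

lemma zabG_glue (cs : List Char) : ∀ (i : Nat), zabG cs i = zabGlue (zabSp cs) i := by
  induction cs with
  | nil => intro i; simp [zabG, zabSp, zabGlue, zabXf]
  | cons c rest ih =>
    intro i
    by_cases hsp : c = ' '
    · subst hsp
      have ha : PySem.Chars.isalpha ' ' = false := by decide
      simp only [zabG, zabSp, ha, Bool.false_eq_true, if_false, if_true]
      cases h : zabSp rest with
      | nil => exact absurd h (zabSp_ne_nil rest)
      | cons w ws =>
        simp only [zabGlue, zabXf, List.nil_append]
        rw [ih 0, h]
    · cases h : zabSp rest with
      | nil => exact absurd h (zabSp_ne_nil rest)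
      | cons w ws =>
        by_cases ha : PySem.Chars.isalpha c
        · simp only [zabG, zabSp, hsp, if_false, h, ha, if_true]
          rw [zabGlue_ch_cons c w ws i ha, ← h, ← ih]
        · simp only [zabG, zabSp, hsp, if_false, h, ha]
          rw [zabGlue_ch_cons' c w ws i ha, ← h, ← ih]
          simp

lemma zabGo_eq (sep : List Char) (hsep : sep = [' ']) :
    ∀ (fuel : Nat) (l cur : List Char) (acc : List (List Char)), l.length < fuel →
      PySem.Chars.splitOn.go sep fuel l cur acc = acc.reverse ++ zabCH cur.reverse (zabSp l) := by
  subst hsep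
  intro fuel
  induction fuel with
  | zero => intro l cur acc h; omega
  | succ f ih =>
    intro l cur acc h
    cases l with
    | nil =>
      simp [PySem.Chars.splitOn.go, zabSp, zabCH]
    | cons c rest =>
      by_cases hc : c = ' '
      · subst hc
        have hpre : [' '].isPrefixOf (' ' :: rest) = true := by
          simp [List.isPrefixOf]
        rw [PySem.Chars.splitOn.go]
        simp only [hpre, if_true, List.length_cons, List.drop_succ_cons, List.length_nil, List.drop_zero]
        rw [ih rest [] (cur.reverse :: acc) (by simpa using Nat.lt_of_succ_lt_succ h)]
        have hne := zabSp_ne_nil rest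
        simp only [zabSp, if_true, List.reverse_cons, List.reverse_nil]
        rw [zabCH_nil_of_ne _ hne]
        cases hz : zabSp rest with
        | nil => exact absurd hz hne
        | cons w ws => simp [zabCH]
      · have hpre : [' '].isPrefixOf (c :: rest) = false := by
          simp [List.isPrefixOf]
          intro hh; exact hc hh.symm
        rw [PySem.Chars.splitOn.go]
        simp only [hpre, Bool.false_eq_true, if_false]
        rw [ih rest (c :: cur) acc (by simpa using Nat.lt_of_succ_lt_succ h)]
        simp only [zabSp, hc, if_false, List.reverse_cons]
        cases hz : zabSp rest with
        | nil => exact absurd hz (zabSp_ne_nil rest)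
        | cons w ws => simp [zabCH]

lemma zabSplitOn_eq (cs : List Char) : PySem.Chars.splitOn cs [' '] = zabSp cs := by
  unfold PySem.Chars.splitOn
  rw [zabGo_eq [' '] rfl (cs.length + 1) cs [] [] (by omega)]
  simp [zabCH_nil_of_ne _ (zabSp_ne_nil cs)]

lemma zab_intercalate_cons_cons (sep a b : List Char) (t : List (List Char)) :
    sep.intercalate (a :: b :: t) = a ++ (sep ++ sep.intercalate (b :: t)) := by
  induction t generalizing a b with
  | nil => simp [List.intercalate, List.intersperse]
  | cons x xs ih => simp_all [List.intercalate, List.intersperse]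

lemma zabGlue_join (ws : List (List Char)) :
    zabGlue ws 0 = PySem.Chars.join [' '] (ws.map (fun w => zabXf w 0)) := by
  induction ws with
  | nil => simp [zabGlue, PySem.Chars.join, List.intercalate]
  | cons w t ih =>
    cases t with
    | nil => simp [zabGlue, PySem.Chars.join, List.intercalate]
    | cons w2 t2 =>
      simp only [zabGlue, ih, PySem.Chars.join, List.map_cons]
      rw [zab_intercalate_cons_cons]
      simp

-- ===== VERDICT (by name: the statement is the Claim_ definition above) =====
theorem zaborchik_spec : Claim_equal_zaborchik := by
  intro line _
  unfold Spec_zaborchik zaborchik zaborchik_alt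
  rw [zabFoldA, List.nil_append, zabG_glue, zabSplitOn_eq]
  congr 1
  rw [zabGlue_join]
  congr 1
  simp [zabWord_eq]
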